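-- pv_equiv track=rewrite | github.com/gacybercenter/cyber-range-monitor | range_monitor/plugins/saltstack/parse.py | sort_minions_by_role
-- ===== SOURCE A (Python) =====
-- def sort_minions_by_role(data):
--     sorted_data = {}
--     roles = set(entry['role'] for entry in data.values())
--     for role in roles:
--         sorted_data[role] = []
--     for entry_id, entry in data.items():
--         role = entry['role']
--         sorted_data[role].append((entry_id, entry))
--     myKeys = list(sorted_data.keys())
--     myKeys.sort()
--     sorted_dict = {i: sorted_data[i] for i in myKeys}
--     return sorted_dict
-- ===== SOURCE B (Python) =====
-- def sort_minions_by_role(data):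
--     roles = sorted(set(entry['role'] for entry in data.values()))
--     return {role: [(entry_id, entry) for entry_id, entry in data.items()
--                    if entry['role'] == role]
--             for role in roles}
-- ===== Notes on version B (the rewrite author's own statement) =====
-- stated objective: idiomatic
-- what changed: A pre-initialises a role-keyed dict of empty lists from a set, appends each item in a second pass and finally rebuilds the dict over its sorted keys; B sorts the distinct roles once and builds the result directly as a dict comprehension that filters the items per role.
import Mathlib
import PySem

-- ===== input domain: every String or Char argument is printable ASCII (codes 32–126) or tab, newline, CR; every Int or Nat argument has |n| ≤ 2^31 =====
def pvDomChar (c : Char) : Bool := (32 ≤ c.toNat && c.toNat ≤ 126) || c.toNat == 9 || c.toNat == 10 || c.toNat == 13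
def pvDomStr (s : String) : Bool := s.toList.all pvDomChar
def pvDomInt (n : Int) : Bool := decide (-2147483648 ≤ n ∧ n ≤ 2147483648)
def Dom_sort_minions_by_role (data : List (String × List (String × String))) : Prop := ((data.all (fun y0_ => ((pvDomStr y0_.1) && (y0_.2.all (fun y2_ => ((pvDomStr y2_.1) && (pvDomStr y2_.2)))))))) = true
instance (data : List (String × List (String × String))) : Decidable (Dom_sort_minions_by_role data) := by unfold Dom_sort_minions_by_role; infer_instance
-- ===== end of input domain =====

-- B replaces A's set-build + pre-init + append + sorted-key rebuild by a sorted-roles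
-- dict comprehension that filters the items per role (idiomatic; not claimed faster).

-- ===== PORT A =====
-- entry['role']; Pre_ guarantees the key is present, so the .getD "" default is never used
def pvRole (entry : List (String × String)) : String :=
  ((PySem.Dict.mk entry).get? "role").getD ""

def sort_minions_by_role (data : List (String × List (String × String))) : List (String × List (String × (List (String × String)))) :=
  -- roles = set(entry['role'] for entry in data.values())
  let roles : PySem.Set String := PySem.Set.ofList (data.map (fun kv => pvRole kv.2))
  -- for role in roles: sorted_data[role] = []   (set iteration order; result is key-sorted below, so order-independent)
  let sorted_data : PySem.Dict String (List (String × (List (String × String)))) :=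
    roles.foldl (fun d r => d.insert r []) PySem.Dict.empty
  -- for entry_id, entry in data.items(): sorted_data[entry['role']].append((entry_id, entry))
  let sorted_data := data.foldl (fun d kv => d.modify (pvRole kv.2) [] (fun l => l ++ [kv])) sorted_data
  -- myKeys = list(sorted_data.keys()); myKeys.sort()
  let myKeys := PySem.List.sorted sorted_data.keys (fun x => x) false
  -- {i: sorted_data[i] for i in myKeys}  (i is always a key, so sorted_data[i] never raises)
  myKeys.map (fun i => (i, sorted_data.getD i []))

-- ===== PORT B =====
def sort_minions_by_role_alt (data : List (String × List (String × String))) : List (String × List (String × (List (String × String)))) :=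
  -- roles = sorted(set(entry['role'] for entry in data.values()))
  let roles := PySem.List.sorted (PySem.Set.ofList (data.map (fun kv => pvRole kv.2))) (fun x => x) false
  -- {role: [(entry_id, entry) for entry_id, entry in data.items() if entry['role'] == role] for role in roles}
  roles.map (fun r => (r, data.filter (fun kv => pvRole kv.2 == r)))

-- ===== PRECONDITION & SPEC =====
-- Pre_ excludes exactly the inputs where some entry lacks the key "role": there the Python A
-- (and B) raises KeyError.
def Pre_sort_minions_by_role (data : List (String × List (String × String))) : Prop :=
  ∀ kv ∈ data, ((PySem.Dict.mk kv.2).get? "role").isSome = true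
instance (data : List (String × List (String × String))) : Decidable (Pre_sort_minions_by_role data) := by unfold Pre_sort_minions_by_role; infer_instance

def pvWitness_sort_minions_by_role : (List (String × List (String × String))) :=
  [("m1", [("role", "web"), ("os", "deb")]), ("m2", [("role", "db")])]

def Spec_sort_minions_by_role (data : List (String × List (String × String))) (out : List (String × List (String × (List (String × String))))) : Prop := out = sort_minions_by_role_alt data
instance (data : List (String × List (String × String))) (out : List (String × List (String × (List (String × String))))) : Decidable (Spec_sort_minions_by_role data out) := by unfold Spec_sort_minions_by_role; infer_instance

-- ===== CLAIM (what is proved, stated in full; the proofs are below) =====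
def Claim_equal_sort_minions_by_role : Prop := ∀ (data : List (String × List (String × String))), Dom_sort_minions_by_role data → Pre_sort_minions_by_role data → Spec_sort_minions_by_role data (sort_minions_by_role data)

-- ===== LEMMAS AND PROOFS =====

-- the pre-initialisation loop leaves every lookup at []
lemma getD_init_empty (R : List String) (c : String)
    (d : PySem.Dict String (List (String × (List (String × String)))))
    (h : d.getD c [] = []) :
    (R.foldl (fun d r => d.insert r []) d).getD c [] = [] := by
  induction R generalizing d with
  | nil => exact h
  | cons a t ih =>
    simp only [List.foldl_cons]
    refine ih _ ?_
    rw [PySem.Dict.getD_insert]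
    split_ifs with hca
    · rfl
    · exact h

-- the append loop accumulates exactly the items whose role is c
lemma getD_append_loop (data : List (String × List (String × String))) (c : String)
    (d : PySem.Dict String (List (String × (List (String × String))))) :
    (data.foldl (fun d kv => d.modify (pvRole kv.2) [] (fun l => l ++ [kv])) d).getD c []
      = d.getD c [] ++ data.filter (fun kv => pvRole kv.2 == c) := by
  induction data generalizing d with
  | nil => simp
  | cons kv t ih =>
    simp only [List.foldl_cons, List.filter_cons, ih]
    rw [PySem.Dict.getD_modify]
    by_cases hc : c = pvRole kv.2
    · simp [hc, List.append_assoc]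
    · have hbc : (pvRole kv.2 == c) = false := beq_eq_false_iff_ne.mpr (fun h => hc h.symm)
      simp [hc, hbc]

-- updating a set with elements it already contains changes nothing
lemma set_update_self (l : List String) (s : PySem.Set String) (h : ∀ x ∈ l, x ∈ s) :
    PySem.Set.update s l = s := by
  induction l generalizing s with
  | nil => rfl
  | cons a t ih =>
    simp only [PySem.Set.update, List.foldl_cons] at *
    rw [PySem.Set.add_of_mem (h a (by simp))]
    exact ih s (fun x hx => h x (by simp [hx]))

-- the keys of A's intermediate dict are exactly the distinct roles, in first-occurrence order
lemma keys_A (data : List (String × List (String × String))) :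
    ((data.foldl (fun d kv => d.modify (pvRole kv.2) [] (fun l => l ++ [kv]))
        ((PySem.Set.ofList (data.map (fun kv => pvRole kv.2))).foldl
          (fun d r => d.insert r []) PySem.Dict.empty)).keys)
      = PySem.Set.ofList (data.map (fun kv => pvRole kv.2)) := by
  rw [PySem.Dict.keys_foldl_modify_key data (fun kv => pvRole kv.2) []
        (fun _ kv => fun l => l ++ [kv]),
      PySem.Dict.keys_foldl_insert _ (fun _ _ => [])]
  rw [PySem.Dict.keys_empty]
  have h1 : PySem.Set.update ([] : PySem.Set String)
      (PySem.Set.ofList (data.map (fun kv => pvRole kv.2)))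
      = PySem.Set.ofList (PySem.Set.ofList (data.map (fun kv => pvRole kv.2))) := rfl
  rw [h1, PySem.Set.ofList_eq_self_of_nodup _ (PySem.Set.nodup_ofList _)]
  exact set_update_self _ _ (fun x hx => (PySem.Set.mem_ofList _ _).mpr hx)

-- ===== VERDICT (by name: the statement is the Claim_ definition above) =====
theorem sort_minions_by_role_spec : Claim_equal_sort_minions_by_role := by
  intro data _ _
  unfold Spec_sort_minions_by_role
  simp only [sort_minions_by_role, sort_minions_by_role_alt]
  rw [keys_A]
  apply List.map_congr_left
  intro r _
  rw [getD_append_loop, getD_init_empty _ _ _ (by rw [PySem.Dict.getD_empty])]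
  simp
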